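-- pv_equiv track=rewrite | github.com/FareseWaltherLab/LipidCruncher | lipidomics/data_format_handler.py | _parse_workbench_conditions
-- ===== SOURCE A (Python) =====
-- def _parse_workbench_conditions(conditions):
--     """
--     Parses condition strings from Metabolomics Workbench format.
--     Example: "Diet:Normal | BileAcid:water" -> {'Diet': 'Normal', 'BileAcid': 'water'}
--     """
--     parsed_conditions = {}
--     for condition in conditions:
--         if isinstance(condition, str):
--             factors = condition.split('|')
--             for factor in factors:
--                 factor = factor.strip()
--                 if ':' in factor:
--                     key, value = factor.split(':')
--                     key = key.strip()
--                     value = value.strip()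
--                     if key not in parsed_conditions:
--                         parsed_conditions[key] = []
--                     if value not in parsed_conditions[key]:
--                         parsed_conditions[key].append(value)
--
--     return parsed_conditions
-- ===== SOURCE B (Python) =====
-- def _parse_workbench_conditions(conditions):
--     """
--     Parses condition strings from Metabolomics Workbench format.
--     Collect-then-group re-implementation: pass 1 flattens every condition
--     into (key, value) pairs, pass 2 groups them, pass 3 dedups each value
--     list preserving first-appearance order.
--     """
--     pairs = []
--     for condition in conditions:
--         if isinstance(condition, str):
--             for factor in condition.split('|'):
--                 factor = factor.strip()
--                 if ':' in factor:
--                     key, value = factor.split(':')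
--                     pairs.append((key.strip(), value.strip()))
--     grouped = {}
--     for key, value in pairs:
--         grouped.setdefault(key, []).append(value)
--     return {k: list(dict.fromkeys(v)) for k, v in grouped.items()}
-- ===== Notes on version B (the rewrite author's own statement) =====
-- stated objective: alternative
-- what changed: A dedups incrementally while updating the result dict per factor; B is a three-pass pipeline: flatten all conditions into a flat (key, value) pair list, group it with setdefault, then dedup each group at the end with dict.fromkeys.
import Mathlib
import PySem

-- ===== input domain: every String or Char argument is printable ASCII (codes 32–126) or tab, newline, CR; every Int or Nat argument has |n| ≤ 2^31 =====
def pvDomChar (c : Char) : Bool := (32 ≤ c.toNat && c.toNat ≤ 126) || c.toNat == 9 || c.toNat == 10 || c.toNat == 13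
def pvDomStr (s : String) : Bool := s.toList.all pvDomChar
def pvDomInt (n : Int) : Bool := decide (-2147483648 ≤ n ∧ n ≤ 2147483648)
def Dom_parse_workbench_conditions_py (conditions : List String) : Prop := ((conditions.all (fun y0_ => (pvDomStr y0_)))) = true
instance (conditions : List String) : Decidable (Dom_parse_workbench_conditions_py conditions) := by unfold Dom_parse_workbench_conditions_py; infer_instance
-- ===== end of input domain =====

-- B re-decomposes A's one-pass dict building into flatten-to-pairs / group / order-preserving dedup;
-- equivalence of the RETURN value is proved on inputs where every colon-containing factor has exactly one ':'
-- (elsewhere Python A raises ValueError on unpacking, and so does B).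

-- s.split(sep) for a nonempty literal sep (never raises); shared primitive wrapper
def pvSplit (s sep : String) : List String := (PySem.Str.split? s sep).getD []

-- ===== PORT A =====
def pvFactorStepA (d : PySem.Dict String (List String)) (factor0 : String) :
    PySem.Dict String (List String) :=
  let factor := PySem.Str.strip factor0
  if PySem.Str.isIn ":" factor then
    match pvSplit factor ":" with
    | [key0, value0] =>
      let key := PySem.Str.strip key0
      let value := PySem.Str.strip value0
      let d1 := if d.contains key then d else d.insert key []
      if value ∈ d1.getD key [] then d1 else d1.insert key (d1.getD key [] ++ [value])
    | _ => d  -- Python raises ValueError here (unpacking ≠ 2 parts); excluded by Pre_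
  else d

def parse_workbench_conditions_py (conditions : List String) : List (String × List String) :=
  (conditions.foldl (fun d condition => (pvSplit condition "|").foldl pvFactorStepA d)
    PySem.Dict.empty).items

-- ===== PORT B =====
def pvFactorPairB (acc : List (String × String)) (factor0 : String) : List (String × String) :=
  let factor := PySem.Str.strip factor0
  if PySem.Str.isIn ":" factor then
    match pvSplit factor ":" with
    | [key0, value0] => acc ++ [(PySem.Str.strip key0, PySem.Str.strip value0)]
    | _ => acc  -- Python raises ValueError here (unpacking ≠ 2 parts); excluded by Pre_
  else acc

def parse_workbench_conditions_py_alt (conditions : List String) : List (String × List String) :=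
  let pairs := conditions.foldl (fun acc condition => (pvSplit condition "|").foldl pvFactorPairB acc) []
  let grouped := pairs.foldl (fun d p => d.modify p.1 [] (· ++ [p.2])) PySem.Dict.empty
  grouped.items.map (fun p => (p.1, PySem.List.dedup p.2))

-- ===== PRECONDITION & SPEC =====
-- Pre_ excludes exactly the inputs where some stripped factor contains more than one ':' —
-- there Python A's unpacking `key, value = factor.split(':')` raises ValueError (B raises the same).
def Pre_parse_workbench_conditions_py (conditions : List String) : Prop :=
  ∀ c ∈ conditions, ∀ f ∈ pvSplit c "|",
    PySem.Str.isIn ":" (PySem.Str.strip f) = true →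
    (pvSplit (PySem.Str.strip f) ":").length = 2
instance (conditions : List String) : Decidable (Pre_parse_workbench_conditions_py conditions) := by
  unfold Pre_parse_workbench_conditions_py; infer_instance

def pvWitness_parse_workbench_conditions_py : List String :=
  ["Diet:Normal | BileAcid:water", "Diet:HF"]

def Spec_parse_workbench_conditions_py (conditions : List String) (out : List (String × List String)) : Prop := out = parse_workbench_conditions_py_alt conditions
instance (conditions : List String) (out : List (String × List String)) : Decidable (Spec_parse_workbench_conditions_py conditions out) := by unfold Spec_parse_workbench_conditions_py; infer_instance

-- ===== CLAIM (what is proved, stated in full; the proofs are below) =====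
def Claim_equal_parse_workbench_conditions_py : Prop := ∀ (conditions : List String), Dom_parse_workbench_conditions_py conditions → Pre_parse_workbench_conditions_py conditions → Spec_parse_workbench_conditions_py conditions (parse_workbench_conditions_py conditions)

-- ===== LEMMAS AND PROOFS =====

-- the two ports extract the same (key, value) pair (or skip) from a factor
def pvExtract (factor0 : String) : Option (String × String) :=
  let factor := PySem.Str.strip factor0
  if PySem.Str.isIn ":" factor then
    match pvSplit factor ":" with
    | [key0, value0] => some (PySem.Str.strip key0, PySem.Str.strip value0)
    | _ => none
  else none

-- how A consumes one extracted pair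
def pvPairStep (d : PySem.Dict String (List String)) (p : String × String) :
    PySem.Dict String (List String) :=
  let d1 := if d.contains p.1 then d else d.insert p.1 []
  if p.2 ∈ d1.getD p.1 [] then d1 else d1.insert p.1 (d1.getD p.1 [] ++ [p.2])

-- per-key dedup of every stored value list
def pvPhi (d : PySem.Dict String (List String)) : PySem.Dict String (List String) :=
  PySem.Dict.mk (d.items.map (fun p => (p.1, PySem.List.dedup p.2)))

theorem pvFactorStepA_eq (d : PySem.Dict String (List String)) (f : String) :
    pvFactorStepA d f = match pvExtract f with
      | some p => pvPairStep d p
      | none => d := by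
  simp only [pvFactorStepA, pvExtract, pvPairStep]
  split_ifs with h
  · split <;> rfl
  · rfl

theorem pvFactorPairB_eq (acc : List (String × String)) (f : String) :
    pvFactorPairB acc f = match pvExtract f with
      | some p => acc ++ [p]
      | none => acc := by
  simp only [pvFactorPairB, pvExtract]
  split_ifs with h
  · split <;> rfl
  · rfl

theorem foldl_stepA_eq (l : List String) (d : PySem.Dict String (List String)) :
    l.foldl pvFactorStepA d = (l.filterMap pvExtract).foldl pvPairStep d := by
  induction l generalizing d with
  | nil => rfl
  | cons f l ih =>
    simp only [List.foldl_cons, List.filterMap_cons, pvFactorStepA_eq]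
    cases h : pvExtract f <;> simp [ih]

theorem foldl_pairB_eq (l : List String) (acc : List (String × String)) :
    l.foldl pvFactorPairB acc = acc ++ l.filterMap pvExtract := by
  induction l generalizing acc with
  | nil => simp
  | cons f l ih =>
    simp only [List.foldl_cons, List.filterMap_cons, pvFactorPairB_eq]
    cases h : pvExtract f <;> simp [ih]

def pvAllPairs (conditions : List String) : List (String × String) :=
  conditions.flatMap (fun c => (pvSplit c "|").filterMap pvExtract)

theorem outerA_eq (conditions : List String) (d : PySem.Dict String (List String)) :
    conditions.foldl (fun d c => (pvSplit c "|").foldl pvFactorStepA d) d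
      = (pvAllPairs conditions).foldl pvPairStep d := by
  simp only [pvAllPairs]
  induction conditions generalizing d with
  | nil => rfl
  | cons c cs ih =>
    simp only [List.flatMap_cons, List.foldl_cons, List.foldl_append]
    rw [foldl_stepA_eq]
    exact ih _

theorem outerB_eq (conditions : List String) (acc : List (String × String)) :
    conditions.foldl (fun acc c => (pvSplit c "|").foldl pvFactorPairB acc) acc
      = acc ++ pvAllPairs conditions := by
  simp only [pvAllPairs]
  induction conditions generalizing acc with
  | nil => simp
  | cons c cs ih =>
    simp only [List.flatMap_cons, List.foldl_cons]
    rw [foldl_pairB_eq, ih, List.append_assoc]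

theorem pvPhi_keys (d : PySem.Dict String (List String)) : (pvPhi d).keys = d.keys := by
  simp [pvPhi, PySem.Dict.keys, List.map_map]

theorem pvPhi_contains (d : PySem.Dict String (List String)) (k : String) :
    (pvPhi d).contains k = d.contains k := by
  simp [PySem.Dict.contains_eq_decide_mem_keys, pvPhi_keys]

theorem pvPhi_getD (d : PySem.Dict String (List String)) (k : String)
    (h : d.keys.Nodup) : (pvPhi d).getD k [] = PySem.List.dedup (d.getD k []) := by
  cases hc : d.contains k with
  | false =>
    rw [PySem.Dict.getD_of_not_contains _ _ ((pvPhi_contains d k).trans hc),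
        PySem.Dict.getD_of_not_contains _ _ hc]
    rfl
  | true =>
    obtain ⟨v, hv⟩ : ∃ v, d.get? k = some v := by
      cases hg : d.get? k with
      | none => exact absurd ((PySem.Dict.get?_eq_none_iff_contains d k).mp hg) (by simp [hc])
      | some v => exact ⟨v, rfl⟩
    have hmem := PySem.Dict.mem_items_of_get?_eq_some d hv
    have hmem2 : (k, PySem.List.dedup v) ∈ (pvPhi d).items := by
      simp only [pvPhi]
      exact List.mem_map.mpr ⟨(k, v), hmem, rfl⟩
    rw [PySem.Dict.getD_of_mem_items d hmem h [],
        PySem.Dict.getD_of_mem_items (pvPhi d) hmem2 (by rw [pvPhi_keys]; exact h) []]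

theorem pvStep_comm (d : PySem.Dict String (List String)) (p : String × String)
    (h : d.keys.Nodup) :
    pvPairStep (pvPhi d) p = pvPhi (d.modify p.1 [] (· ++ [p.2])) := by
  obtain ⟨k, v⟩ := p
  have hmod : d.modify k [] (· ++ [v]) = d.insert k (d.getD k [] ++ [v]) := rfl
  rw [hmod]
  simp only [pvPairStep]
  cases hc : d.contains k with
  | false =>
    have hc' : (pvPhi d).contains k = false := (pvPhi_contains d k).trans hc
    rw [PySem.Dict.getD_of_not_contains _ _ hc, hc']
    simp only [Bool.false_eq_true, if_false, PySem.Dict.getD_insert_self, List.not_mem_nil,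
      List.nil_append, PySem.Dict.insert_insert_self]
    apply PySem.Dict.ext
    rw [PySem.Dict.items_insert_of_not_contains _ _ hc']
    simp only [pvPhi]
    rw [PySem.Dict.items_insert_of_not_contains _ _ hc]
    simp [List.map_append]
    exact (PySem.Set.ofList_eq_self_of_nodup [v] (List.nodup_singleton v)).symm
  | true =>
    simp only [pvPhi_contains, hc, if_pos, pvPhi_getD d k h]
    by_cases hv : v ∈ d.getD k []
    · rw [if_pos ((PySem.List.mem_dedup _ _).mpr hv)]
      apply PySem.Dict.ext
      simp only [pvPhi]
      rw [PySem.Dict.items_insert_of_contains _ _ hc, List.map_map]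
      apply List.map_congr_left
      intro q hq
      by_cases hqk : q.1 = k
      · have hq2 : q.2 = d.getD k [] := by
          have hm : (k, q.2) ∈ d.items := by rw [← hqk]; exact hq
          exact (PySem.Dict.getD_of_mem_items d hm h []).symm
        have hd : PySem.Set.ofList (d.getD k [] ++ [v]) = PySem.Set.ofList (d.getD k []) := by
          rw [PySem.Set.ofList_append_singleton,
            PySem.Set.add_of_mem ((PySem.Set.mem_ofList _ _).mpr hv)]
        simp [Function.comp_apply, hqk, hq2]
        exact hd.symm
      · simp [Function.comp_apply, hqk]
    · rw [if_neg (fun hmem => hv ((PySem.List.mem_dedup _ _).mp hmem))]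
      apply PySem.Dict.ext
      rw [PySem.Dict.items_insert_of_contains _ _ ((pvPhi_contains d k).trans hc)]
      simp only [pvPhi]
      rw [PySem.Dict.items_insert_of_contains _ _ hc]
      simp only [List.map_map]
      apply List.map_congr_left
      intro q hq
      have hd : PySem.Set.ofList (d.getD k [] ++ [v]) = PySem.Set.ofList (d.getD k []) ++ [v] := by
        rw [PySem.Set.ofList_append_singleton,
          PySem.Set.add_of_not_mem (fun hmem => hv ((PySem.Set.mem_ofList _ _).mp hmem))]
      by_cases hqk : q.1 = k
      · simp [Function.comp_apply, hqk]
        exact hd.symm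
      · simp [Function.comp_apply, hqk]

theorem pvMain (ps : List (String × String)) (d : PySem.Dict String (List String))
    (h : d.keys.Nodup) :
    ps.foldl pvPairStep (pvPhi d) = pvPhi (ps.foldl (fun d p => d.modify p.1 [] (· ++ [p.2])) d) := by
  induction ps generalizing d with
  | nil => rfl
  | cons p ps ih =>
    simp only [List.foldl_cons, pvStep_comm d p h]
    refine ih _ ?_
    have h1 : (d.modify p.1 [] (· ++ [p.2])).keys = (d.insert p.1 ((d.getD p.1 []) ++ [p.2])).keys :=
      PySem.Dict.keys_modify d p.1 [] (· ++ [p.2])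
    rw [h1]
    exact PySem.Dict.nodup_keys_insert d p.1 _ h

-- ===== VERDICT (by name: the statement is the Claim_ definition above) =====
theorem parse_workbench_conditions_py_spec : Claim_equal_parse_workbench_conditions_py := by
  intro conditions _ _
  unfold Spec_parse_workbench_conditions_py
  unfold parse_workbench_conditions_py parse_workbench_conditions_py_alt
  rw [outerA_eq, outerB_eq]
  have h0 : (PySem.Dict.empty : PySem.Dict String (List String)) = pvPhi PySem.Dict.empty := rfl
  rw [h0, pvMain _ _ PySem.Dict.nodup_keys_empty]
  rfl
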